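-- pv_equiv track=rewrite | github.com/lantunes/netomaton | netomaton/hopfield_tank_tsp_net.py | _get_cell_label_map
-- ===== SOURCE A (Python) =====
-- def _get_cell_label_map(points):
--     """
--     Returns a dictionary where the keys are the cell indices (there are n^2 cells, where n is the number of points),
--     and the values are a tuple (row, col), representing the row index and column index of the cell in the permutation
--     matrix (the matrix describing the tour, where each row represents a point, and each column represents the position
--     of that point in the tour.
--     :param points: a list of tuples, where each tuple represents a point's x and y coordinates
--     :return: a dictionary with cell indices as keys and tuple (row, col) for the position of the cell in the permutation
--              matrix as values
--     """
--     cell_label_map = {}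
--     num_points = len(points)
--     current_point = 0
--     current_cell = 0
--     while current_point < num_points:
--         for n in range(num_points):
--             cell_label_map[current_cell] = (current_point, n)
--             current_cell += 1
--         current_point += 1
--     return cell_label_map
-- ===== SOURCE B (Python) =====
-- def _get_cell_label_map(points):
--     num_points = len(points)
--     return {i: divmod(i, num_points) for i in range(num_points * num_points)}
-- ===== Notes on version B (the rewrite author's own statement) =====
-- stated objective: simpler
-- what changed: Replaces the nested while/for loops with manual running counters by a single pass over range(n*n) that computes each (row, col) in closed form via divmod(i, n).
import Mathlib
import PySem

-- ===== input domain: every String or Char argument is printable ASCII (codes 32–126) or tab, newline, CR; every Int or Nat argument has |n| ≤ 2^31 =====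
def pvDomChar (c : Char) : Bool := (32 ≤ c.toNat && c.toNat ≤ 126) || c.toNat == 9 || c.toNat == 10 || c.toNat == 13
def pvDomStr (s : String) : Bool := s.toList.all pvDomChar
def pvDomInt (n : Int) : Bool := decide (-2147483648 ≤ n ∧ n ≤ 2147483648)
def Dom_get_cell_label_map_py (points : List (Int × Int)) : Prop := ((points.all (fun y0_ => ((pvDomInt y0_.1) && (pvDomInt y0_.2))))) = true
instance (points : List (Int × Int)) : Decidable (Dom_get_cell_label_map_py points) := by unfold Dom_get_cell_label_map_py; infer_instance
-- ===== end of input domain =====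

-- B replaces A's nested while/for loops with running counters by one pass over
-- range(n*n) computing (row, col) in closed form with divmod — simpler, same cost.


-- ===== PORT A =====
-- inner 'for n in range(num_points): cell_label_map[current_cell] = (current_point, n); current_cell += 1'
def pvAInner (num_points : Int) (cp : Int) (s : PySem.Dict Int (Int × Int) × Int) :
    PySem.Dict Int (Int × Int) × Int :=
  (PySem.List.pyRange 0 num_points 1).foldl (fun s n => (s.1.insert s.2 (cp, n), s.2 + 1)) s

-- the 'while current_point < num_points' loop; fuel = num_points bounds its iterations exactly
def pvAWhile (fuel : Nat) (num_points : Int) (d : PySem.Dict Int (Int × Int)) (cp cc : Int) :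
    PySem.Dict Int (Int × Int) :=
  match fuel with
  | 0 => d
  | Nat.succ f =>
    if cp < num_points then
      let s := pvAInner num_points cp (d, cc)
      pvAWhile f num_points s.1 (cp + 1) s.2
    else d

def get_cell_label_map_py (points : List (Int × Int)) : List (Int × Int × Int) :=
  let num_points : Int := points.length
  (pvAWhile points.length num_points PySem.Dict.empty 0 0).items

-- ===== PORT B =====
def get_cell_label_map_py_alt (points : List (Int × Int)) : List (Int × Int × Int) :=
  let n : Int := points.length
  -- {i: divmod(i, n) for i in range(n*n)}; divmod(i, n) = (i // n, i % n), never reached for n = 0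
  (PySem.List.pyRange 0 (n * n) 1).map (fun i => (i, PySem.Int.floordiv i n, PySem.Int.mod i n))

-- ===== PRECONDITION & SPEC =====
def Spec_get_cell_label_map_py (points : List (Int × Int)) (out : List (Int × Int × Int)) : Prop := out = get_cell_label_map_py_alt points
instance (points : List (Int × Int)) (out : List (Int × Int × Int)) : Decidable (Spec_get_cell_label_map_py points out) := by unfold Spec_get_cell_label_map_py; infer_instance

-- ===== CLAIM (what is proved, stated in full; the proofs are below) =====
def Claim_equal_get_cell_label_map_py : Prop := ∀ (points : List (Int × Int)), Dom_get_cell_label_map_py points → Spec_get_cell_label_map_py points (get_cell_label_map_py points)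

-- ===== LEMMAS AND PROOFS =====

-- the closed-form cell list shared by both characterisations
def pvCells (n : Nat) (l : List Nat) : List (Int × Int × Int) :=
  l.map (fun (i : Nat) => ((i : Int), ((i / n : Nat) : Int), ((i % n : Nat) : Int)))

theorem pvInner_spec (cp cc : Int) (d : PySem.Dict Int (Int × Int)) (m : Nat)
    (hk : ∀ p ∈ d.items, p.1 < cc) :
    pvAInner (m : Int) cp (d, cc)
      = (PySem.Dict.mk (d.items ++ (List.range m).map (fun (j : Nat) => (cc + (j : Int), cp, (j : Int)))),
         cc + m) := by
  induction m with
  | zero => simp [pvAInner]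
  | succ m ih =>
    have hcast : ((m + 1 : Nat) : Int) = (m : Int) + 1 := by push_cast; ring
    unfold pvAInner at ih ⊢
    rw [hcast, PySem.List.pyRange_one_succ_right (by positivity), List.foldl_append, ih]
    simp only [List.foldl_cons, List.foldl_nil]
    have hcon : (PySem.Dict.mk (κ := Int) (ν := Int × Int)
        (d.items ++ (List.range m).map (fun (j : Nat) => (cc + (j : Int), cp, (j : Int))))).contains
        (cc + (m : Int)) = false := by
      simp only [PySem.Dict.contains, List.any_eq_false]
      intro p hp
      rcases List.mem_append.mp hp with h | h
      · have := hk p h; simp only [beq_iff_eq]; omega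
      · rcases List.mem_map.mp h with ⟨j, hj, rfl⟩
        have hj' : j < m := List.mem_range.mp hj
        simp only [beq_iff_eq]
        have : (j : Int) < (m : Int) := by exact_mod_cast hj'
        omega
    simp only [PySem.Dict.insert, hcon, if_false, Bool.false_eq_true]
    rw [List.range_succ]
    refine congrArg₂ Prod.mk (congrArg PySem.Dict.mk ?_) (by ring)
    simp [List.append_assoc]

theorem pvWhile_spec (n f cp : Nat) (d : PySem.Dict Int (Int × Int))
    (hf : cp + f = n) (hk : ∀ p ∈ d.items, p.1 < ((cp * n : Nat) : Int)) :
    (pvAWhile f (n : Int) d (cp : Int) ((cp * n : Nat) : Int)).items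
      = d.items ++ pvCells n (List.range' (cp * n) (f * n)) := by
  induction f generalizing cp d with
  | zero => simp [pvAWhile, pvCells]
  | succ f ih =>
    have hcp : cp < n := by omega
    have hn : 0 < n := by omega
    unfold pvAWhile
    rw [if_pos (by exact_mod_cast hcp)]
    rw [pvInner_spec (cp : Int) _ d n hk]
    have hcc : ((cp * n : Nat) : Int) + (n : Int) = (((cp + 1) * n : Nat) : Int) := by
      push_cast; ring
    rw [hcc]
    have hk' : ∀ p ∈ (d.items ++ (List.range n).map
        (fun (j : Nat) => (((cp * n : Nat) : Int) + (j : Int), (cp : Int), (j : Int)))),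
        p.1 < (((cp + 1) * n : Nat) : Int) := by
      intro p hp
      rcases List.mem_append.mp hp with h | h
      · have := hk p h
        have : ((cp * n : Nat) : Int) ≤ (((cp + 1) * n : Nat) : Int) := by
          push_cast; nlinarith
        omega
      · rcases List.mem_map.mp h with ⟨j, hj, rfl⟩
        have hj' : j < n := List.mem_range.mp hj
        have : ((cp * n : Nat) : Int) + (j : Int) < (((cp + 1) * n : Nat) : Int) := by
          push_cast
          have : (j : Int) < (n : Int) := by exact_mod_cast hj'
          nlinarith
        simpa using this
    have hstep : ((cp + 1 : Nat) : Int) = (cp : Int) + 1 := by push_cast; ring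
    rw [← hstep, ih (cp + 1) _ (by omega) hk']
    rw [List.append_assoc]
    congr 1
    -- the new row as cells of range' (cp*n) n, then merge the two range' blocks
    have hrow : (List.range n).map
        (fun (j : Nat) => (((cp * n : Nat) : Int) + (j : Int), (cp : Int), (j : Int)))
        = pvCells n (List.range' (cp * n) n) := by
      rw [pvCells, List.range'_eq_map_range, List.map_map]
      apply List.map_congr_left
      intro j hj
      have hj' : j < n := List.mem_range.mp hj
      have hdiv : (cp * n + j) / n = cp := by
        rw [Nat.add_comm, Nat.mul_comm, Nat.add_mul_div_left _ _ hn, Nat.div_eq_of_lt hj']; omega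
      have hmod : (cp * n + j) % n = j := by
        rw [Nat.add_comm, Nat.mul_comm, Nat.add_mul_mod_self_left, Nat.mod_eq_of_lt hj']
      simp [Function.comp, hdiv, hmod]
    rw [hrow, pvCells, pvCells, ← List.map_append]
    congr 1
    rw [show (cp + 1) * n = cp * n + 1 * n by ring, show (f + 1) * n = n + f * n by ring]
    exact List.range'_append

theorem pvAlt_spec (points : List (Int × Int)) :
    get_cell_label_map_py_alt points = pvCells points.length (List.range (points.length * points.length)) := by
  unfold pvCells
  show (PySem.List.pyRange 0 ((points.length : Int) * (points.length : Int))).map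
      (fun i => (i, PySem.Int.floordiv i (points.length : Int), PySem.Int.mod i (points.length : Int)))
      = _
  have hcast : ((points.length : Int) * (points.length : Int))
      = ((points.length * points.length : Nat) : Int) := by push_cast; ring
  rw [hcast, PySem.List.pyRange_one]
  simp only [Int.sub_zero, Int.toNat_natCast, List.map_map]
  apply List.map_congr_left
  intro i _
  simp [Function.comp, PySem.Int.floordiv_natCast, PySem.Int.mod_natCast]

-- ===== VERDICT (by name: the statement is the Claim_ definition above) =====
theorem get_cell_label_map_py_spec : Claim_equal_get_cell_label_map_py := by
  intro points _
  unfold Spec_get_cell_label_map_py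
  show (pvAWhile points.length (points.length : Int) PySem.Dict.empty 0 0).items = _
  have := pvWhile_spec points.length points.length 0 PySem.Dict.empty (by omega)
    (by intro p hp; simp [PySem.Dict.empty] at hp)
  rw [pvAlt_spec]
  simp only [Nat.cast_zero, Nat.zero_mul] at this
  rw [this]
  simp [List.range_eq_range', PySem.Dict.empty]
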